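-- pv_equiv track=rewrite | github.com/TcMysunshine/AdvanceAlgorithms | PythonAA/Second/LongestCommonSubSeries.py | getLIDSIndex
-- ===== SOURCE A (Python) =====
-- def getLIDSIndex(arr):
--     length = len(arr)
--     lisMax = [1] * length
--     ldsMax = [1] * length
--     for i in range(1, length):
--         for j in range(i):
--             if arr[i] > arr[j] and lisMax[i] < lisMax[j] + 1:
--                 lisMax[i] = lisMax[j] + 1
--         m = length - i - 1
--         for k in range(length - 1, m, -1):
--             if arr[m] > arr[k] and ldsMax[m] < ldsMax[k] + 1:
--                 ldsMax[m] = ldsMax[k] + 1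
--     result = [0]*length
--     for i in range(length):
--         result[i] = lisMax[i] + ldsMax[i]
--     maxIndex = []
--     maxCount = max(result)
--     for index in range(length):
--         if result[index] == maxCount:
--             maxIndex.append(index)
--     return maxIndex
-- ===== SOURCE B (Python) =====
-- def getLIDSIndex(arr):
--     # O(n log n): per-index strict-LIS lengths via patience sorting with a
--     # hand-rolled binary search (bisect_left); the LDS-starting-at-i lengths
--     # are the LIS-ending lengths of the reversed array, reversed back.
--     def lengths(seq):
--         tails = []
--         out = []
--         for x in seq:
--             lo, hi = 0, len(tails)
--             while lo < hi:
--                 mid = (lo + hi) // 2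
--                 if tails[mid] < x:
--                     lo = mid + 1
--                 else:
--                     hi = mid
--             if lo == len(tails):
--                 tails.append(x)
--             else:
--                 tails[lo] = x
--             out.append(lo + 1)
--         return out
--     inc = lengths(arr)
--     dec = lengths(arr[::-1])[::-1]
--     sums = [a + b for a, b in zip(inc, dec)]
--     best = max(sums)
--     return [i for i, s in enumerate(sums) if s == best]
-- ===== Notes on version B (the rewrite author's own statement) =====
-- stated objective: faster
-- what changed: Replaces A's O(n^2) nested-loop DP for per-index LIS/LDS lengths by patience sorting (binary search on a 'tails' list), computing the same lengths in O(n log n); the LDS-starting lengths are obtained by running the same routine on the reversed array.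
-- outside the precondition, e.g. on getLIDSIndex([]): A raises ValueError, B raises ValueError
import Mathlib
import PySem

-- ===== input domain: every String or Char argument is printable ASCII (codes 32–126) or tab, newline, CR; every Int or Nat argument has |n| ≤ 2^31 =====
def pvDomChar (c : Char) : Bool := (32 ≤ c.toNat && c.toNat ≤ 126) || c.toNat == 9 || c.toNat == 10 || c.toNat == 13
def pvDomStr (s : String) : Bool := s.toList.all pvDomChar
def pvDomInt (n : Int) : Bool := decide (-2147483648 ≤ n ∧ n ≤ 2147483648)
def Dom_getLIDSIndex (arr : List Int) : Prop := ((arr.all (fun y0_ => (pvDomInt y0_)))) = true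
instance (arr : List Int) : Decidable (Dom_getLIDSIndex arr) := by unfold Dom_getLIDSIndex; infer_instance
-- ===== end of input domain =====

-- B replaces A's O(n^2) quadratic DP by patience sorting (binary search on a tails list),
-- computing the same per-index LIS/LDS lengths in O(n log n).

-- ===== PORT A =====
def getLIDSIndex (arr : List Int) : List Int :=
  let length : Int := (arr.length : Int)
  let lisMax0 : List Int := List.replicate arr.length 1
  let ldsMax0 : List Int := List.replicate arr.length 1
  let st :=
    (PySem.List.pyRange 1 length 1).foldl (fun (st : List Int × List Int) i =>
      ((PySem.List.pyRange 0 i 1).foldl (fun lis j =>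
        if PySem.List.pyGetD arr i 0 > PySem.List.pyGetD arr j 0 ∧
           PySem.List.pyGetD lis i 0 < PySem.List.pyGetD lis j 0 + 1
        then PySem.List.pySetD lis i (PySem.List.pyGetD lis j 0 + 1) else lis) st.1,
       (PySem.List.pyRange (length - 1) (length - i - 1) (-1)).foldl (fun lds k =>
        if PySem.List.pyGetD arr (length - i - 1) 0 > PySem.List.pyGetD arr k 0 ∧
           PySem.List.pyGetD lds (length - i - 1) 0 < PySem.List.pyGetD lds k 0 + 1
        then PySem.List.pySetD lds (length - i - 1) (PySem.List.pyGetD lds k 0 + 1) else lds) st.2))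
      (lisMax0, ldsMax0)
  let result :=
    (PySem.List.pyRange 0 length 1).foldl
      (fun r i => PySem.List.pySetD r i (PySem.List.pyGetD st.1 i 0 + PySem.List.pyGetD st.2 i 0))
      (List.replicate arr.length 0)
  match PySem.List.max? result (fun x => x) with
  | none => []  -- Python: max(result) raises ValueError on an empty list; excluded by Pre_
  | some maxCount =>
    (PySem.List.pyRange 0 length 1).foldl
      (fun acc index => if PySem.List.pyGetD result index 0 = maxCount then acc ++ [index] else acc) []

-- ===== PORT B =====
-- Source B's hand-written lo/hi while loop is CPython's bisect_left verbatim;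
-- ported as PySem.List.bisectLeft, the same (lo+hi)/2 halving loop (exact on all inputs).
def pvLengths (seq : List Int) : List Int :=
  (seq.foldl (fun (st : List Int × List Int) x =>
    let lo := PySem.List.bisectLeft st.1 x
    (if lo = st.1.length then st.1 ++ [x] else st.1.set lo x, st.2 ++ [(lo : Int) + 1]))
    ([], [])).2

def getLIDSIndex_alt (arr : List Int) : List Int :=
  let inc := pvLengths arr
  let dec := (pvLengths arr.reverse).reverse
  let sums := List.zipWith (· + ·) inc dec
  match PySem.List.max? sums (fun x => x) with
  | none => []  -- Python: max(sums) raises ValueError on an empty list; excluded by Pre_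
  | some best =>
    (List.range sums.length).foldl
      (fun acc i => if sums.getD i 0 = best then acc ++ [(i : Int)] else acc) []

-- ===== PRECONDITION & SPEC =====
-- Pre_ excludes only the empty list, on which Python A raises ValueError (max of empty sequence).
def Pre_getLIDSIndex (arr : List Int) : Prop := arr ≠ []
instance (arr : List Int) : Decidable (Pre_getLIDSIndex arr) := by unfold Pre_getLIDSIndex; infer_instance
def pvWitness_getLIDSIndex : List Int := [3, 1, 2]

def Spec_getLIDSIndex (arr : List Int) (out : List Int) : Prop := out = getLIDSIndex_alt arr
instance (arr : List Int) (out : List Int) : Decidable (Spec_getLIDSIndex arr out) := by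
  unfold Spec_getLIDSIndex; infer_instance

-- ===== CLAIM (what is proved, stated in full; the proofs are below) =====
def Claim_equal_getLIDSIndex : Prop :=
  ∀ (arr : List Int), Dom_getLIDSIndex arr → Pre_getLIDSIndex arr →
    Spec_getLIDSIndex arr (getLIDSIndex arr)

-- ===== LEMMAS AND PROOFS =====

def dpNext (P : List (Int × Int)) (x : Int) : Int :=
  1 + P.foldl (fun m p => if p.1 < x then max m p.2 else m) 0

-- characterization of the conditional running max
theorem condMax_ge_init (P : List (Int × Int)) (x : Int) (m0 : Int) :
    m0 ≤ P.foldl (fun m p => if p.1 < x then max m p.2 else m) m0 := by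
  induction P generalizing m0 with
  | nil => simp
  | cons p r ih =>
    simp only [List.foldl_cons]
    refine le_trans ?_ (ih _)
    split <;> simp

theorem condMax_ge (P : List (Int × Int)) (x : Int) (m0 : Int) :
    ∀ p ∈ P, p.1 < x → p.2 ≤ P.foldl (fun m p => if p.1 < x then max m p.2 else m) m0 := by
  induction P generalizing m0 with
  | nil => simp
  | cons q r ih =>
    intro p hp hpx
    simp only [List.foldl_cons]
    rcases List.mem_cons.mp hp with hp | hp
    · subst hp
      refine le_trans ?_ (condMax_ge_init r x _)
      simp [hpx]
    · exact ih _ p hp hpx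

theorem condMax_cases (P : List (Int × Int)) (x : Int) (m0 : Int) :
    P.foldl (fun m p => if p.1 < x then max m p.2 else m) m0 = m0 ∨
    ∃ p ∈ P, p.1 < x ∧ P.foldl (fun m p => if p.1 < x then max m p.2 else m) m0 = p.2 := by
  induction P generalizing m0 with
  | nil => simp
  | cons q r ih =>
    simp only [List.foldl_cons]
    rcases ih (if q.1 < x then max m0 q.2 else m0) with h | h
    · rw [h]
      by_cases hq : q.1 < x
      · simp only [hq, if_true]
        rcases max_choice m0 q.2 with hm | hm
        · exact Or.inl hm
        · exact Or.inr ⟨q, List.mem_cons_self .., hq, hm⟩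
      · simp [hq]
    · rcases h with ⟨p, hp, hpx, hval⟩
      exact Or.inr ⟨p, List.mem_cons_of_mem _ hp, hpx, hval⟩

theorem condfold_shift (P : List (Int × Int)) (x : Int) (c m : Int) (h : c = 1 + m) :
    P.foldl (fun c p => if x > p.1 ∧ c < p.2 + 1 then p.2 + 1 else c) c
    = 1 + P.foldl (fun m p => if p.1 < x then max m p.2 else m) m := by
  induction P generalizing c m with
  | nil => simpa using h
  | cons q r ih =>
    simp only [List.foldl_cons]
    apply ih
    split_ifs with h1 h2 h2 <;> omega

def PInv (P : List (Int × Int)) (tails : List Int) : Prop :=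
  tails.Pairwise (· < ·) ∧
  (∀ k, (hk : k < tails.length) → ∃ p ∈ P, p.2 = (k : Int) + 1 ∧ p.1 = tails[k]) ∧
  (∀ p ∈ P, 1 ≤ p.2 ∧ p.2 ≤ (tails.length : Int) ∧ tails.getD (p.2 - 1).toNat 0 ≤ p.1)

theorem bisect_facts (tails : List Int) (x : Int) (hpw : tails.Pairwise (· < ·)) :
    PySem.List.bisectLeft tails x ≤ tails.length ∧
    (∀ j, (hj : j < tails.length) → j < PySem.List.bisectLeft tails x → tails[j] < x) ∧
    (∀ j, (hj : j < tails.length) → PySem.List.bisectLeft tails x ≤ j → x ≤ tails[j]) :=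
  PySem.List.bisectLeft_spec tails x (hpw.imp le_of_lt)

-- the length assigned by patience is the DP value
theorem patience_val (P : List (Int × Int)) (tails : List Int) (x : Int) (h : PInv P tails) :
    (PySem.List.bisectLeft tails x : Int) + 1 = dpNext P x := by
  obtain ⟨hpw, inv2, inv3⟩ := h
  obtain ⟨hle, hlt, hge⟩ := bisect_facts tails x hpw
  set lo := PySem.List.bisectLeft tails x with hlo
  unfold dpNext
  set M := P.foldl (fun m p => if p.1 < x then max m p.2 else m) 0 with hM
  have hMlo : M = (lo : Int) := by
    have hge' : (lo : Int) ≤ M := by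
      rcases Nat.eq_zero_or_pos lo with h0 | h0
      · rw [h0]; exact_mod_cast condMax_ge_init P x 0
      · have hk : lo - 1 < tails.length := by omega
        obtain ⟨p, hp, hp2, hp1⟩ := inv2 (lo - 1) hk
        have : tails[lo-1] < x := hlt _ hk (by omega)
        have := condMax_ge P x 0 p hp (by rw [hp1]; exact this)
        have hcast : ((lo - 1 : Nat) : Int) + 1 = (lo : Int) := by omega
        omega
    have hle' : M ≤ (lo : Int) := by
      rcases condMax_cases P x 0 with h | ⟨p, hp, hpx, hval⟩
      · rw [← hM] at h; omega
      · rw [← hM] at hval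
        rw [hval]
        by_contra hgt
        obtain ⟨hp1, hp2, hp3⟩ := inv3 p hp
        have hidx : (p.2 - 1).toNat < tails.length := by omega
        have hloidx : lo ≤ (p.2 - 1).toNat := by omega
        have := hge _ hidx hloidx
        rw [List.getD_eq_getElem _ _ hidx] at hp3
        omega
    omega
  omega

theorem PInv_step (P : List (Int × Int)) (tails : List Int) (x : Int) (h : PInv P tails) :
    PInv (P ++ [(x, dpNext P x)])
      (if PySem.List.bisectLeft tails x = tails.length
       then tails ++ [x] else tails.set (PySem.List.bisectLeft tails x) x) := by
  obtain ⟨hpw, inv2, inv3⟩ := h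
  obtain ⟨hle, hlt, hge⟩ := bisect_facts tails x hpw
  set lo := PySem.List.bisectLeft tails x with hlo
  have hdp : dpNext P x = (lo : Int) + 1 := (patience_val P tails x ⟨hpw, inv2, inv3⟩).symm
  rw [List.pairwise_iff_getElem] at hpw
  by_cases hcase : lo = tails.length
  · rw [if_pos hcase]
    refine ⟨?_, ?_, ?_⟩
    · rw [List.pairwise_iff_getElem]
      intro a b ha hb hab
      simp only [List.length_append, List.length_singleton] at ha hb
      by_cases hbl : b < tails.length
      · rw [List.getElem_append_left (by omega), List.getElem_append_left hbl]
        exact hpw a b (by omega) hbl hab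
      · have hb' : b = tails.length := by omega
        rw [List.getElem_append_left (by omega)]
        have : (tails ++ [x])[b] = x := by
          subst hb'; simp
        rw [this]
        exact hlt a (by omega) (by omega)
    · intro k hk
      simp only [List.length_append, List.length_singleton] at hk
      by_cases hkl : k < tails.length
      · obtain ⟨p, hp, h2, h1⟩ := inv2 k hkl
        exact ⟨p, List.mem_append_left _ hp, h2, by rw [h1, List.getElem_append_left hkl]⟩
      · have hk' : k = tails.length := by omega
        refine ⟨(x, dpNext P x), List.mem_append_right _ (by simp), ?_, ?_⟩
        · simp [hdp, hk', hcase]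
        · subst hk'; simp
    · intro p hp
      rcases List.mem_append.mp hp with hp | hp
      · obtain ⟨h1, h2, h3⟩ := inv3 p hp
        refine ⟨h1, by simp; omega, ?_⟩
        have hidx : (p.2 - 1).toNat < tails.length := by omega
        rw [List.getD_eq_getElem _ _ (by simp; omega), List.getElem_append_left hidx,
          ← List.getD_eq_getElem _ _ hidx]
        exact h3
      · simp only [List.mem_singleton] at hp
        subst hp
        refine ⟨by simp [hdp], by simp [hdp]; omega, ?_⟩
        simp only [hdp]
        have : ((lo : Int) + 1 - 1).toNat = tails.length := by omega
        rw [this]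
        simp
  · rw [if_neg hcase]
    have hlolt : lo < tails.length := by omega
    have hxle : x ≤ tails[lo] := hge lo hlolt le_rfl
    refine ⟨?_, ?_, ?_⟩
    · rw [List.pairwise_iff_getElem]
      intro a b ha hb hab
      simp only [List.length_set] at ha hb
      rw [List.getElem_set, List.getElem_set]
      by_cases hal : lo = a <;> by_cases hbl : lo = b
      · exfalso; omega
      · simp only [if_pos hal, if_neg hbl]
        calc x ≤ tails[lo] := hxle
          _ < tails[b] := hpw lo b hlolt hb (by omega)
      · simp only [if_neg hal, if_pos hbl]
        exact hlt a ha (by omega)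
      · simp only [if_neg hal, if_neg hbl]
        exact hpw a b ha hb hab
    · intro k hk
      simp only [List.length_set] at hk
      by_cases hkl : k = lo
      · refine ⟨(x, dpNext P x), List.mem_append_right _ (by simp), by simp [hdp, hkl], ?_⟩
        simp [hkl]
      · obtain ⟨p, hp, h2, h1⟩ := inv2 k hk
        exact ⟨p, List.mem_append_left _ hp, h2,
          by rw [h1, List.getElem_set, if_neg (by omega)]⟩
    · intro p hp
      rcases List.mem_append.mp hp with hp | hp
      · obtain ⟨h1, h2, h3⟩ := inv3 p hp
        refine ⟨h1, by simpa using h2, ?_⟩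
        have hidx : (p.2 - 1).toNat < tails.length := by omega
        rw [List.getD_eq_getElem _ _ (by simpa using hidx), List.getElem_set]
        rw [List.getD_eq_getElem _ _ hidx] at h3
        by_cases hil : lo = (p.2 - 1).toNat
        · rw [if_pos hil]
          exact le_trans (hge _ hidx (by omega)) h3
        · rw [if_neg hil]; exact h3
      · simp only [List.mem_singleton] at hp
        subst hp
        refine ⟨by simp [hdp], by simp [hdp]; omega, ?_⟩
        simp only [hdp]
        have h1 : ((lo : Int) + 1 - 1).toNat = lo := by omega
        rw [h1, List.getD_eq_getElem _ _ (by simpa using hlolt), List.getElem_set, if_pos rfl]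

def dpPairs : List (Int × Int) → List Int → List (Int × Int)
  | acc, [] => acc
  | acc, x :: r => dpPairs (acc ++ [(x, dpNext acc x)]) r


theorem pvLengths_general (l : List Int) (P : List (Int × Int)) (tails out : List Int)
    (hinv : PInv P tails) (hout : out = P.map Prod.snd) :
    (l.foldl (fun (st : List Int × List Int) x =>
      let lo := PySem.List.bisectLeft st.1 x
      (if lo = st.1.length then st.1 ++ [x] else st.1.set lo x, st.2 ++ [(lo : Int) + 1]))
      (tails, out)).2 = (dpPairs P l).map Prod.snd := by
  induction l generalizing P tails out with
  | nil => simpa [dpPairs] using hout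
  | cons x r ih =>
    simp only [List.foldl_cons, dpPairs]
    exact ih (P ++ [(x, dpNext P x)]) _ _ (PInv_step P tails x hinv)
      (by simp [hout, patience_val P tails x hinv])

theorem dpPairs_fst (acc : List (Int × Int)) (l : List Int) :
    (dpPairs acc l).map Prod.fst = acc.map Prod.fst ++ l := by
  induction l generalizing acc with
  | nil => simp [dpPairs]
  | cons x r ih => simp [dpPairs, ih]

theorem dpPairs_length (acc : List (Int × Int)) (l : List Int) :
    (dpPairs acc l).length = acc.length + l.length := by
  have := congrArg List.length (dpPairs_fst acc l)
  simpa using this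

theorem inner_general_aux (A L0 : List Int) (D : List (Int × Int)) (ι : Nat → Nat) (p i : Nat)
    (hp : p < L0.length)
    (hιlt : ∀ k, k < i → ι k < L0.length)
    (hιne : ∀ k, k < i → ι k ≠ p)
    (hv : ∀ k, k < i → A.getD (ι k) 0 = (D.getD k (0,0)).1)
    (hd : ∀ k, k < i → L0.getD (ι k) 0 = (D.getD k (0,0)).2)
    (hcur : L0.getD p 0 = 1) (hD : D.length = i) (t : Nat) (ht : t ≤ i) :
    (List.range t).foldl (fun L k =>
       if A.getD p 0 > A.getD (ι k) 0 ∧ L.getD p 0 < L.getD (ι k) 0 + 1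
       then L.set p (L.getD (ι k) 0 + 1) else L) L0
    = L0.set p ((D.take t).foldl
        (fun c q => if A.getD p 0 > q.1 ∧ c < q.2 + 1 then q.2 + 1 else c) 1) := by
  induction t with
  | zero =>
    simp only [List.range_zero, List.foldl_nil, List.take_zero, List.foldl_nil]
    rw [List.getD_eq_getElem _ _ hp] at hcur
    rw [← hcur, List.set_getElem_self]
  | succ t iht =>
    have ht' : t ≤ i := by omega
    have htlt : t < i := by omega
    rw [List.range_succ, List.foldl_append, iht ht']
    have htD : t < D.length := by omega
    have htake : D.take (t+1) = D.take t ++ [D[t]] := by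
      rw [List.take_add_one, List.getElem?_eq_getElem htD]
      rfl
    rw [htake, List.foldl_append]
    simp only [List.foldl_cons, List.foldl_nil]
    set c := (D.take t).foldl
        (fun c q => if A.getD p 0 > q.1 ∧ c < q.2 + 1 then q.2 + 1 else c) 1 with hc
    have hread_ι : (L0.set p c).getD (ι t) 0 = L0.getD (ι t) 0 := by
      rw [List.getD_eq_getElem _ _ (by simpa using hιlt t htlt),
          List.getD_eq_getElem _ _ (hιlt t htlt), List.getElem_set,
          if_neg (fun h => (hιne t htlt) h.symm)]
    have hread_p : (L0.set p c).getD p 0 = c := by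
      rw [List.getD_eq_getElem _ _ (by simpa using hp), List.getElem_set, if_pos rfl]
    rw [hread_ι, hread_p, hd t htlt, hv t htlt]
    have hDt : D.getD t (0,0) = D[t] := List.getD_eq_getElem _ _ htD
    rw [hDt]
    split_ifs with h
    · rw [List.set_set]
    · rfl

theorem inner_general (A L0 : List Int) (D : List (Int × Int)) (ι : Nat → Nat) (p i : Nat)
    (hp : p < L0.length)
    (hιlt : ∀ k, k < i → ι k < L0.length)
    (hιne : ∀ k, k < i → ι k ≠ p)
    (hv : ∀ k, k < i → A.getD (ι k) 0 = (D.getD k (0,0)).1)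
    (hd : ∀ k, k < i → L0.getD (ι k) 0 = (D.getD k (0,0)).2)
    (hcur : L0.getD p 0 = 1) (hD : D.length = i) :
    (List.range i).foldl (fun L k =>
       if A.getD p 0 > A.getD (ι k) 0 ∧ L.getD p 0 < L.getD (ι k) 0 + 1
       then L.set p (L.getD (ι k) 0 + 1) else L) L0
    = L0.set p (dpNext D (A.getD p 0)) := by
  rw [inner_general_aux A L0 D ι p i hp hιlt hιne hv hd hcur hD i le_rfl]
  rw [List.take_of_length_le (by omega)]
  rw [condfold_shift D (A.getD p 0) 1 0 (by ring)]
  rfl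

theorem conv_lis_inner (arr : List Int) (i0 : Nat) (L : List Int) :
    (PySem.List.pyRange 0 (i0 : Int) 1).foldl (fun lis j =>
      if PySem.List.pyGetD arr (i0 : Int) 0 > PySem.List.pyGetD arr j 0 ∧
         PySem.List.pyGetD lis (i0 : Int) 0 < PySem.List.pyGetD lis j 0 + 1
      then PySem.List.pySetD lis (i0 : Int) (PySem.List.pyGetD lis j 0 + 1) else lis) L
    = (List.range i0).foldl (fun L k =>
        if arr.getD i0 0 > arr.getD k 0 ∧ L.getD i0 0 < L.getD k 0 + 1
        then L.set i0 (L.getD k 0 + 1) else L) L := by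
  rw [PySem.List.pyRange_zero, Int.toNat_natCast, List.foldl_map]
  simp [PySem.List.pyGetD_natCast, PySem.List.pySetD_natCast]

theorem conv_lds_inner (arr : List Int) (n i0 : Nat) (L : List Int)
    (_hn : arr.length = n) (hi : i0 + 1 ≤ n) :
    (PySem.List.pyRange ((n : Int) - 1) ((n : Int) - i0 - 1) (-1)).foldl (fun lds k =>
      if PySem.List.pyGetD arr ((n : Int) - i0 - 1) 0 > PySem.List.pyGetD arr k 0 ∧
         PySem.List.pyGetD lds ((n : Int) - i0 - 1) 0 < PySem.List.pyGetD lds k 0 + 1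
      then PySem.List.pySetD lds ((n : Int) - i0 - 1) (PySem.List.pyGetD lds k 0 + 1) else lds) L
    = (List.range i0).foldl (fun L k =>
        if arr.getD (n - i0 - 1) 0 > arr.getD (n - 1 - k) 0 ∧
           L.getD (n - i0 - 1) 0 < L.getD (n - 1 - k) 0 + 1
        then L.set (n - i0 - 1) (L.getD (n - 1 - k) 0 + 1) else L) L := by
  rw [PySem.List.pyRange_neg_one]
  have h1 : (((n : Int) - 1) - ((n : Int) - i0 - 1)).toNat = i0 := by omega
  rw [h1, List.foldl_map]
  have h2 : ((n : Int) - i0 - 1) = ((n - i0 - 1 : Nat) : Int) := by omega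
  rw [h2]
  apply PySem.List.foldl_congr_mem
  intro acc k hk
  rw [List.mem_range] at hk
  have h3 : ((n : Int) - 1 - (k : Nat)) = ((n - 1 - k : Nat) : Int) := by omega
  rw [h3]
  simp [PySem.List.pyGetD_natCast, PySem.List.pySetD_natCast]

theorem dpPairs_append (acc : List (Int × Int)) (l1 l2 : List Int) :
    dpPairs acc (l1 ++ l2) = dpPairs (dpPairs acc l1) l2 := by
  induction l1 generalizing acc with
  | nil => simp [dpPairs]
  | cons x r ih => simp [dpPairs, ih]

theorem getD_replicate_one (m j : Nat) (h : j < m) : (List.replicate m (1 : Int)).getD j 0 = 1 := by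
  rw [List.getD_eq_getElem _ _ (by simpa using h)]; simp

theorem getD_map_snd (D : List (Int × Int)) (k : Nat) (hk : k < D.length) :
    (D.map Prod.snd).getD k 0 = (D.getD k (0, 0)).2 := by
  rw [List.getD_eq_getElem _ _ (by simpa using hk), List.getElem_map, List.getD_eq_getElem _ _ hk]

theorem getD_rev_map_snd (D : List (Int × Int)) (j : Nat) (hj : j < D.length) :
    ((D.map Prod.snd).reverse).getD j 0 = (D.getD (D.length - 1 - j) (0, 0)).2 := by
  rw [List.getD_eq_getElem _ _ (by simpa using hj), List.getElem_reverse, List.getElem_map,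
    List.getD_eq_getElem _ _ (by omega)]
  simp

theorem getD_fst_eq (arr : List Int) (D : List (Int × Int)) (m : Nat)
    (hfst : D.map Prod.fst = arr.take m) (k : Nat) (hk : k < D.length) (hkA : k < arr.length) :
    (D.getD k (0, 0)).1 = arr.getD k 0 := by
  have hkT : k < (arr.take m).length := by rw [← hfst]; simpa using hk
  have h1 := List.getElem_of_eq hfst (by simpa using hk : k < (D.map Prod.fst).length)
  simp only [List.getElem_map, List.getElem_take] at h1
  rw [List.getD_eq_getElem _ _ hk, List.getD_eq_getElem _ _ hkA]
  exact h1

theorem lis_outer_aux (arr : List Int) (n : Nat) (hn : arr.length = n) (hpos : 1 ≤ n)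
    (c : Nat) (hc : c ≤ n - 1) :
    (PySem.List.pyRange 1 (1 + (c : Int)) 1).foldl (fun lis i =>
      (PySem.List.pyRange 0 i 1).foldl (fun lis j =>
        if PySem.List.pyGetD arr i 0 > PySem.List.pyGetD arr j 0 ∧
           PySem.List.pyGetD lis i 0 < PySem.List.pyGetD lis j 0 + 1
        then PySem.List.pySetD lis i (PySem.List.pyGetD lis j 0 + 1) else lis) lis)
      (List.replicate n 1)
    = (dpPairs [] (arr.take (c + 1))).map Prod.snd ++ List.replicate (n - (c + 1)) 1 := by
  induction c with
  | zero =>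
    rw [show ((1 : Int) + ((0 : Nat) : Int) = 1) by simp, PySem.List.pyRange_one_eq_nil le_rfl,
      List.foldl_nil]
    obtain ⟨a, r, rfl⟩ : ∃ a r, arr = a :: r := by
      cases arr with
      | nil => simp at hn; omega
      | cons a r => exact ⟨a, r, rfl⟩
    simp only [List.take_succ_cons, List.take_zero, dpPairs, dpNext, List.foldl_nil,
      List.nil_append, List.map_cons, List.map_nil]
    have : n - 1 + 1 = n := by omega
    rw [← this, List.replicate_succ]
    simp
  | succ c ih =>
    have hc' : c ≤ n - 1 := by omega
    have h1 : (1 : Int) + ((c + 1 : Nat) : Int) = (1 + (c : Int)) + 1 := by push_cast; ring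
    rw [h1, PySem.List.pyRange_one_succ_right (by omega), List.foldl_append, ih hc',
      List.foldl_cons, List.foldl_nil]
    have h2 : (1 + (c : Int)) = ((c + 1 : Nat) : Int) := by push_cast; ring
    rw [h2, conv_lis_inner arr (c + 1)]
    have hDlen : (dpPairs [] (arr.take (c + 1))).length = c + 1 := by
      rw [dpPairs_length]; simp; omega
    have hfst : (dpPairs [] (arr.take (c + 1))).map Prod.fst = arr.take (c + 1) := by
      rw [dpPairs_fst]; simp
    have hcn : c + 1 < n := by omega
    have hv : ∀ k, k < c + 1 → arr.getD k 0 = ((dpPairs [] (arr.take (c + 1))).getD k (0, 0)).1 := by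
      intro k hk
      exact (getD_fst_eq arr _ (c + 1) hfst k (by omega) (by omega)).symm
    have hd : ∀ k, k < c + 1 →
        ((dpPairs [] (arr.take (c + 1))).map Prod.snd ++ List.replicate (n - (c + 1)) 1).getD k 0
        = ((dpPairs [] (arr.take (c + 1))).getD k (0, 0)).2 := by
      intro k hk
      rw [List.getD_append _ _ _ _ (by simpa [hDlen] using hk), getD_map_snd _ _ (by omega)]
    have hcur : ((dpPairs [] (arr.take (c + 1))).map Prod.snd ++
        List.replicate (n - (c + 1)) 1).getD (c + 1) 0 = 1 := by
      rw [List.getD_append_right _ _ _ _ (by simp [hDlen]),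
        getD_replicate_one _ _ (by simp [hDlen]; omega)]
    rw [inner_general arr _ (dpPairs [] (arr.take (c + 1))) (fun k => k) (c + 1) (c + 1)
      (by simp [hDlen]; omega) (fun k hk => by show k < _; simp [hDlen]; omega)
      (fun k hk => by show k ≠ c + 1; omega) hv hd hcur hDlen]
    have htake : arr.take (c + 2) = arr.take (c + 1) ++ [arr[c + 1]'(by omega)] := by
      rw [List.take_add_one, List.getElem?_eq_getElem (by omega)]
      rfl
    have hx : arr.getD (c + 1) 0 = arr[c + 1]'(by omega) := List.getD_eq_getElem _ _ (by omega)
    rw [htake, dpPairs_append]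
    simp only [dpPairs, List.map_append, List.map_cons, List.map_nil]
    rw [List.set_append_right _ _ (by simp [hDlen])]
    have hrep : n - (c + 1) = (n - (c + 2)) + 1 := by omega
    rw [hrep, List.replicate_succ]
    have hgetD : arr[c + 1]?.getD 0 = arr[c + 1]'(by omega) := by
      rw [List.getElem?_eq_getElem (by omega)]
      rfl
    simp [hDlen, hgetD]

theorem lds_outer_aux (arr : List Int) (n : Nat) (hn : arr.length = n) (hpos : 1 ≤ n)
    (c : Nat) (hc : c ≤ n - 1) :
    (PySem.List.pyRange 1 (1 + (c : Int)) 1).foldl (fun lds i =>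
      (PySem.List.pyRange ((n : Int) - 1) ((n : Int) - i - 1) (-1)).foldl (fun lds k =>
        if PySem.List.pyGetD arr ((n : Int) - i - 1) 0 > PySem.List.pyGetD arr k 0 ∧
           PySem.List.pyGetD lds ((n : Int) - i - 1) 0 < PySem.List.pyGetD lds k 0 + 1
        then PySem.List.pySetD lds ((n : Int) - i - 1) (PySem.List.pyGetD lds k 0 + 1) else lds) lds)
      (List.replicate n 1)
    = List.replicate (n - 1 - c) 1 ++ ((dpPairs [] (arr.reverse.take (c + 1))).map Prod.snd).reverse := by
  have hrevlen : arr.reverse.length = n := by simpa using hn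
  induction c with
  | zero =>
    rw [show ((1 : Int) + ((0 : Nat) : Int) = 1) by simp, PySem.List.pyRange_one_eq_nil le_rfl,
      List.foldl_nil]
    obtain ⟨a, r, hrev⟩ : ∃ a r, arr.reverse = a :: r := by
      cases h : arr.reverse with
      | nil => rw [h] at hrevlen; simp at hrevlen; omega
      | cons a r => exact ⟨a, r, rfl⟩
    rw [hrev]
    simp only [List.take_succ_cons, List.take_zero, dpPairs, dpNext, List.foldl_nil,
      List.nil_append, List.map_cons, List.map_nil, List.reverse_cons, List.reverse_nil]
    have : n - 1 + 1 = n := by omega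
    rw [← this, List.replicate_succ']
    simp
  | succ c ih =>
    have hc' : c ≤ n - 1 := by omega
    have h1 : (1 : Int) + ((c + 1 : Nat) : Int) = (1 + (c : Int)) + 1 := by push_cast; ring
    rw [h1, PySem.List.pyRange_one_succ_right (by omega), List.foldl_append, ih hc',
      List.foldl_cons, List.foldl_nil]
    have h2 : (1 + (c : Int)) = ((c + 1 : Nat) : Int) := by push_cast; ring
    rw [h2, conv_lds_inner arr n (c + 1) _ hn (by omega)]
    have hDlen : (dpPairs [] (arr.reverse.take (c + 1))).length = c + 1 := by
      rw [dpPairs_length]; simp [hrevlen]; omega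
    have hfst : (dpPairs [] (arr.reverse.take (c + 1))).map Prod.fst = arr.reverse.take (c + 1) := by
      rw [dpPairs_fst]; simp
    have hcn : c + 1 < n := by omega
    have hrevget : ∀ k, k < c + 1 → arr.reverse.getD k 0 = arr.getD (n - 1 - k) 0 := by
      intro k hk
      rw [List.getD_eq_getElem _ _ (by omega), List.getD_eq_getElem _ _ (by omega),
        List.getElem_reverse]
      congr 1
      omega
    have hv : ∀ k, k < c + 1 →
        arr.getD (n - 1 - k) 0 = ((dpPairs [] (arr.reverse.take (c + 1))).getD k (0, 0)).1 := by
      intro k hk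
      rw [getD_fst_eq arr.reverse _ (c + 1) hfst k (by omega) (by omega), hrevget k hk]
    have hd : ∀ k, k < c + 1 →
        (List.replicate (n - 1 - c) 1 ++
          ((dpPairs [] (arr.reverse.take (c + 1))).map Prod.snd).reverse).getD (n - 1 - k) 0
        = ((dpPairs [] (arr.reverse.take (c + 1))).getD k (0, 0)).2 := by
      intro k hk
      rw [List.getD_append_right _ _ _ _ (by simp; omega)]
      simp only [List.length_replicate]
      rw [getD_rev_map_snd _ _ (by omega)]
      rw [show (dpPairs [] (arr.reverse.take (c + 1))).length - 1 - (n - 1 - k - (n - 1 - c)) = k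
        from by omega]
    have hcur : (List.replicate (n - 1 - c) 1 ++
        ((dpPairs [] (arr.reverse.take (c + 1))).map Prod.snd).reverse).getD (n - (c + 1) - 1) 0
        = 1 := by
      rw [List.getD_append _ _ _ _ (by simp; omega), getD_replicate_one _ _ (by omega)]
    rw [inner_general arr _ (dpPairs [] (arr.reverse.take (c + 1))) (fun k => n - 1 - k)
      (n - (c + 1) - 1) (c + 1)
      (by simp [hDlen]; omega) (fun k hk => by show n - 1 - k < _; simp [hDlen]; omega)
      (fun k hk => by show n - 1 - k ≠ n - (c + 1) - 1; omega) hv hd hcur hDlen]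
    have htake : arr.reverse.take (c + 2)
        = arr.reverse.take (c + 1) ++ [arr.reverse[c + 1]'(by omega)] := by
      rw [List.take_add_one, List.getElem?_eq_getElem (by omega)]
      rfl
    have hx : arr.getD (n - (c + 1) - 1) 0 = arr.reverse[c + 1]'(by omega) := by
      rw [List.getD_eq_getElem _ _ (by omega), List.getElem_reverse]
      congr 1
      omega
    rw [htake, dpPairs_append]
    simp only [dpPairs, List.map_append, List.map_cons, List.map_nil, List.reverse_append,
      List.reverse_cons, List.reverse_nil, List.nil_append, List.singleton_append]
    have hrep : n - 1 - c = (n - 1 - (c + 1)) + 1 := by omega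
    rw [hrep, List.replicate_succ', List.append_assoc,
      List.set_append_right _ _ (by simp; omega)]
    simp only [List.length_replicate]
    rw [show n - (c + 1) - 1 - (n - 1 - (c + 1)) = 0 from by omega,
      List.singleton_append, List.set_cons_zero]
    have hgetD : arr[n - (c + 1) - 1]?.getD 0 = arr[arr.length - 1 - (c + 1)]'(by omega) := by
      rw [List.getElem?_eq_getElem (show n - (c + 1) - 1 < arr.length by omega)]
      simp only [Option.getD_some]
      congr 1
      omega
    simp [hgetD]

theorem pvLengths_eq (l : List Int) : pvLengths l = (dpPairs [] l).map Prod.snd := by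
  unfold pvLengths
  exact pvLengths_general l [] [] [] ⟨List.Pairwise.nil, by simp, by simp⟩ rfl

theorem fill_aux (g : Nat → Int) (r0 : List Int) (t : Nat) (ht : t ≤ r0.length) :
    (List.range t).foldl (fun r i => r.set i (g i)) r0
    = (List.range t).map g ++ r0.drop t := by
  induction t with
  | zero => simp
  | succ t ih =>
    rw [List.range_succ, List.foldl_append, ih (by omega), List.foldl_cons, List.foldl_nil,
      List.map_append, List.set_append_right _ _ (by simp)]
    have hd : r0.drop t = r0[t]'(by omega) :: r0.drop (t + 1) := List.drop_eq_getElem_cons (by omega)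
    rw [hd, List.length_map, List.length_range, Nat.sub_self, List.set_cons_zero]
    simp

-- the common canonical form both ports reduce to
def canon (arr : List Int) : List Int :=
  let sums := List.zipWith (· + ·) ((dpPairs [] arr).map Prod.snd)
    (((dpPairs [] arr.reverse).map Prod.snd).reverse)
  match PySem.List.max? sums (fun x => x) with
  | none => []
  | some best =>
    (List.range arr.length).foldl
      (fun acc i => if sums.getD i 0 = best then acc ++ [(i : Int)] else acc) []

theorem altB_eq (arr : List Int) : getLIDSIndex_alt arr = canon arr := by
  have hlen : (List.zipWith (· + ·) ((dpPairs [] arr).map Prod.snd)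
      (((dpPairs [] arr.reverse).map Prod.snd).reverse)).length = arr.length := by
    simp [List.length_zipWith, dpPairs_length]
  simp only [getLIDSIndex_alt, canon, pvLengths_eq]
  rw [hlen]

theorem portA_eq (arr : List Int) (h : arr ≠ []) : getLIDSIndex arr = canon arr := by
  have hn1 : 1 ≤ arr.length := by
    cases arr with
    | nil => simp at h
    | cons a r => simp
  simp only [getLIDSIndex, canon]
  have hsplit : ∀ (l : List Int) (a b : List Int),
      l.foldl (fun (st : List Int × List Int) i =>
        ((PySem.List.pyRange 0 i 1).foldl (fun lis j =>
          if PySem.List.pyGetD arr i 0 > PySem.List.pyGetD arr j 0 ∧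
             PySem.List.pyGetD lis i 0 < PySem.List.pyGetD lis j 0 + 1
          then PySem.List.pySetD lis i (PySem.List.pyGetD lis j 0 + 1) else lis) st.1,
         (PySem.List.pyRange ((arr.length : Int) - 1) ((arr.length : Int) - i - 1) (-1)).foldl
          (fun lds k =>
          if PySem.List.pyGetD arr ((arr.length : Int) - i - 1) 0 > PySem.List.pyGetD arr k 0 ∧
             PySem.List.pyGetD lds ((arr.length : Int) - i - 1) 0 < PySem.List.pyGetD lds k 0 + 1
          then PySem.List.pySetD lds ((arr.length : Int) - i - 1)
            (PySem.List.pyGetD lds k 0 + 1) else lds) st.2)) (a, b)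
      = (l.foldl (fun lis i =>
          (PySem.List.pyRange 0 i 1).foldl (fun lis j =>
            if PySem.List.pyGetD arr i 0 > PySem.List.pyGetD arr j 0 ∧
               PySem.List.pyGetD lis i 0 < PySem.List.pyGetD lis j 0 + 1
            then PySem.List.pySetD lis i (PySem.List.pyGetD lis j 0 + 1) else lis) lis) a,
         l.foldl (fun lds i =>
          (PySem.List.pyRange ((arr.length : Int) - 1) ((arr.length : Int) - i - 1) (-1)).foldl
            (fun lds k =>
            if PySem.List.pyGetD arr ((arr.length : Int) - i - 1) 0 > PySem.List.pyGetD arr k 0 ∧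
               PySem.List.pyGetD lds ((arr.length : Int) - i - 1) 0 < PySem.List.pyGetD lds k 0 + 1
            then PySem.List.pySetD lds ((arr.length : Int) - i - 1)
              (PySem.List.pyGetD lds k 0 + 1) else lds) lds) b) := by
    intro l
    induction l with
    | nil => intro a b; rfl
    | cons x r ih =>
      intro a b
      simp only [List.foldl_cons]
      exact ih _ _
  rw [hsplit (PySem.List.pyRange 1 (arr.length : Int) 1)
    (List.replicate arr.length 1) (List.replicate arr.length 1)]
  have hlis := lis_outer_aux arr arr.length rfl hn1 (arr.length - 1) le_rfl
  rw [show (1 + ((arr.length - 1 : Nat) : Int)) = (arr.length : Int) from by omega,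
    show arr.length - 1 + 1 = arr.length from by omega, List.take_length] at hlis
  simp only [Nat.sub_self, List.replicate_zero, List.append_nil] at hlis
  have hlds := lds_outer_aux arr arr.length rfl hn1 (arr.length - 1) le_rfl
  rw [show (1 + ((arr.length - 1 : Nat) : Int)) = (arr.length : Int) from by omega,
    show arr.length - 1 + 1 = arr.length from by omega,
    show arr.reverse.take arr.length = arr.reverse from by
      rw [show arr.length = arr.reverse.length from by simp, List.take_length],
    Nat.sub_self, List.replicate_zero, List.nil_append] at hlds
  simp only [hlis, hlds]
  rw [PySem.List.pyRange_zero, Int.toNat_natCast, List.foldl_map]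
  simp only [PySem.List.pyGetD_natCast, PySem.List.pySetD_natCast]
  rw [fill_aux (fun i => ((dpPairs [] arr).map Prod.snd).getD i 0 +
      (((dpPairs [] arr.reverse).map Prod.snd).reverse).getD i 0)
    (List.replicate arr.length 0) arr.length (by simp)]
  rw [show (List.replicate arr.length (0 : Int)).drop arr.length = [] from by simp,
    List.append_nil]
  have hsums : (List.range arr.length).map (fun i =>
      ((dpPairs [] arr).map Prod.snd).getD i 0 +
      (((dpPairs [] arr.reverse).map Prod.snd).reverse).getD i 0)
      = List.zipWith (· + ·) ((dpPairs [] arr).map Prod.snd)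
        (((dpPairs [] arr.reverse).map Prod.snd).reverse) := by
    apply List.ext_getElem
    · simp [List.length_zipWith, dpPairs_length]
    · intro i h1 h2
      have hi : i < arr.length := by simpa using h1
      rw [List.getElem_map, List.getElem_zipWith, List.getElem_range,
        List.getD_eq_getElem _ _ (by simp [dpPairs_length]; omega),
        List.getD_eq_getElem _ _ (by simp [dpPairs_length]; omega)]
  rw [hsums]
  simp only [List.foldl_map, PySem.List.pyGetD_natCast]

-- ===== VERDICT (by name: the statement is the Claim_ definition above) =====
theorem getLIDSIndex_spec : Claim_equal_getLIDSIndex := by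
  unfold Claim_equal_getLIDSIndex
  intro arr _ hpre
  unfold Spec_getLIDSIndex
  rw [portA_eq arr hpre, altB_eq arr]
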